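-- pv_equiv track=rewrite | github.com/kyunghuykCHO/Argorithm-Study | Programmers/Programmers/입국심사.py | solution
-- ===== SOURCE A (Python) =====
-- def solution(n, times):
--     answer = 0
--     left, right = 1, max(times) * n
--     while left <= right:
--         tested = 0
--         mid = (left+ right) // 2
--         for time in times:
--             tested += mid // time
--             if tested >= n:
--                 break
--
--         if tested >= n:
--             answer = mid
--             right = mid - 1
--
--         elif tested < n:
--             left = mid + 1
--
--     return answer
-- ===== SOURCE B (Python) =====
-- def solution(n, times):
--     # Event simulation: repeatedly serve the next person at the desk that
--     # frees up earliest; the n-th completion time is the answer.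
--     state = [(t, 0) for t in times]   # (interval, people served at this desk)
--     ans = 0
--     for _ in range(n):
--         best = min((c + 1) * t for t, c in state)
--         state = _bump(state, best)
--         ans = best
--     return ans
--
--
-- def _bump(state, best):
--     # increment the count of the first desk whose next finish time is `best`
--     out = []
--     done = False
--     for t, c in state:
--         if not done and (c + 1) * t == best:
--             out.append((t, c + 1))
--             done = True
--         else:
--             out.append((t, c))
--     return out
-- ===== Notes on version B (the rewrite author's own statement) =====
-- stated objective: alternative
-- what changed: Replaces binary search on the answer by a discrete-event simulation: each desk keeps its count of served people, and n times the earliest next finish time min((c+1)*t) is popped and that desk's count incremented; the n-th popped finish time is the answer.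
-- outside the precondition, e.g. on solution(2, [-1, 3]): A returns 0, B returns -2
import Mathlib
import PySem

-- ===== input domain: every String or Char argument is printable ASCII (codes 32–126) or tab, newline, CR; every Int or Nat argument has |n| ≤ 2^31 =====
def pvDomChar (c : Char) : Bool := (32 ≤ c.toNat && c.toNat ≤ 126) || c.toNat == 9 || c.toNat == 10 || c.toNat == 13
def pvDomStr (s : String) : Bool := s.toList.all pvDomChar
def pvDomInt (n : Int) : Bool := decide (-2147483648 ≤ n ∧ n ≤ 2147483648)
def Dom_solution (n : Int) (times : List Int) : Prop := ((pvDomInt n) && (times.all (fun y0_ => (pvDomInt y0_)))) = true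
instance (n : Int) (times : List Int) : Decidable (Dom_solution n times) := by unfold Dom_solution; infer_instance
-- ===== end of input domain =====

-- B replaces A's binary search on the answer by a discrete-event simulation that pops
-- the earliest next finish time n times; alternative algorithm, similar size, not faster.


-- ===== PORT A =====
-- inner 'for time in times: tested += mid // time; if tested >= n: break'
def aInner (n mid : Int) : List Int → Int → Int
  | [], tested => tested
  | t :: ts, tested =>
      let tested' := tested + PySem.Int.floordiv mid t
      if n ≤ tested' then tested' else aInner n mid ts tested'

-- outer 'while left <= right' of A
def aLoop (n : Int) (times : List Int) (answer left right : Int) : Int :=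
  if h : left ≤ right then
    let mid := PySem.Int.floordiv (left + right) 2
    let tested := aInner n mid times 0
    if n ≤ tested then aLoop n times mid left (mid - 1)
    else aLoop n times answer (mid + 1) right
  else answer
termination_by (right + 1 - left).toNat
decreasing_by
  · have := (PySem.Int.floordiv_two_mid_bounds h); omega
  · have := (PySem.Int.floordiv_two_mid_bounds h); omega

def solution (n : Int) (times : List Int) : Int :=
  aLoop n times 0 1 (((PySem.List.max? times (fun y => y)).getD 0) * n)

-- ===== PORT B =====
-- '_bump(state, best)': increment the count of the first desk whose next finish is best
def bBump : List (Int × Int) → Bool → Int → List (Int × Int)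
  | [], _, _ => []
  | (t, c) :: rest, done, best =>
      if !done && ((c + 1) * t == best) then (t, c + 1) :: bBump rest true best
      else (t, c) :: bBump rest done best

-- 'for _ in range(n): best = min((c+1)*t for t, c in state); state = _bump(state, best); ans = best'
-- (.getD 0 only totalises min on the empty state, which Pre_ excludes: Python raises there)
def bLoop (times : List Int) : Nat → List (Int × Int) → Int → Int
  | 0, _, ans => ans
  | Nat.succ k, state, _ =>
      let best := (PySem.List.min? (state.map fun p => (p.2 + 1) * p.1) (fun y => y)).getD 0
      bLoop times k (bBump state false best) best

def solution_alt (n : Int) (times : List Int) : Int :=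
  bLoop times n.toNat (times.map fun t => (t, 0)) 0

-- ===== PRECONDITION & SPEC =====
-- Pre_ restricts to the task's natural domain: a nonempty list of positive service times
-- (plus trivial inputs with n <= 0 and max(times)*n <= 0, where A returns 0 without
-- entering its loop and B pops nobody).
-- Excluded are inputs where A raises (empty list: ValueError; a zero time reached by the
-- loop: ZeroDivisionError) and inputs with nonpositive entries and n >= 1, where A
-- binary-searches over meaningless negative quotients.
def Pre_solution (n : Int) (times : List Int) : Prop :=
  times ≠ [] ∧
    ((∀ t ∈ times, 0 < t) ∨
      (n ≤ 0 ∧ ((PySem.List.max? times (fun y => y)).getD 0) * n ≤ 0))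
instance (n : Int) (times : List Int) : Decidable (Pre_solution n times) := by
  unfold Pre_solution; infer_instance

def pvWitness_solution : Int × List Int := (6, [7, 10])

def Spec_solution (n : Int) (times : List Int) (out : Int) : Prop := out = solution_alt n times
instance (n : Int) (times : List Int) (out : Int) : Decidable (Spec_solution n times out) := by unfold Spec_solution; infer_instance

-- ===== CLAIM (what is proved, stated in full; the proofs are below) =====
def Claim_equal_solution : Prop := ∀ (n : Int) (times : List Int), Dom_solution n times → Pre_solution n times → Spec_solution n times (solution n times)

-- ===== LEMMAS AND PROOFS =====

-- the people served by time T: sum over times of T // t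
def cnt (times : List Int) (T : Int) : Int :=
  (times.map (fun x => PySem.Int.floordiv T x)).sum

theorem cnt_mono (times : List Int) (hpos : ∀ t ∈ times, 0 < t) {T T' : Int}
    (h : T ≤ T') : cnt times T ≤ cnt times T' := by
  induction times with
  | nil => simp [cnt]
  | cons x xs ih =>
      have hx : 0 < x := hpos x (by simp)
      have hxs : ∀ t ∈ xs, 0 < t := fun t ht => hpos t (by simp [ht])
      simp only [cnt, List.map_cons, List.sum_cons] at *
      have := Int.ediv_le_ediv hx h
      rw [PySem.Int.floordiv_eq_ediv_of_pos hx, PySem.Int.floordiv_eq_ediv_of_pos hx]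
      exact add_le_add this (ih hxs)

theorem cnt_nonpos (times : List Int) (hpos : ∀ t ∈ times, 0 < t) {T : Int}
    (hT : T ≤ 0) : cnt times T ≤ 0 := by
  induction times with
  | nil => simp [cnt]
  | cons x xs ih =>
      have hx : 0 < x := hpos x (by simp)
      have hxs : ∀ t ∈ xs, 0 < t := fun t ht => hpos t (by simp [ht])
      simp only [cnt, List.map_cons, List.sum_cons] at *
      rw [PySem.Int.floordiv_eq_ediv_of_pos hx]
      have := Int.ediv_nonpos_of_nonpos_of_neg hT hx
      have := ih hxs
      omega

theorem cnt_nonneg_terms (times : List Int) (hpos : ∀ t ∈ times, 0 < t) {T : Int}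
    (hT : 0 ≤ T) : ∀ y ∈ times.map (fun x => PySem.Int.floordiv T x), 0 ≤ y := by
  intro y hy
  obtain ⟨x, hx, rfl⟩ := List.mem_map.mp hy
  rw [PySem.Int.floordiv_eq_ediv_of_pos (hpos x hx)]
  exact Int.ediv_nonneg hT (le_of_lt (hpos x hx))

-- the early-break count reaches n iff the full count does (terms nonnegative)
theorem aInner_iff (n mid : Int) (ts : List Int) (hpos : ∀ t ∈ ts, 0 < t)
    (hmid : 0 ≤ mid) : ∀ acc : Int,
    (n ≤ aInner n mid ts acc ↔ n ≤ acc + cnt ts mid) := by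
  induction ts with
  | nil => intro acc; simp [aInner, cnt]
  | cons x xs ih =>
      intro acc
      have hx : 0 < x := hpos x (by simp)
      have hxs : ∀ t ∈ xs, 0 < t := fun t ht => hpos t (by simp [ht])
      have hsum : 0 ≤ cnt xs mid :=
        List.sum_nonneg (cnt_nonneg_terms xs hxs hmid)
      simp only [aInner, cnt, List.map_cons, List.sum_cons]
      split_ifs with hbr
      · constructor
        · intro _
          simp only [cnt] at hsum
          omega
        · intro _; exact hbr
      · rw [ih hxs (acc + PySem.Int.floordiv mid x)]
        simp only [cnt]
        constructor <;> intro h <;> omega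

-- A's binary search returns the least T with cnt T ≥ n
theorem aLoop_eq (n : Int) (times : List Int) (hpos : ∀ t ∈ times, 0 < t)
    (L : Int) (hL1 : n ≤ cnt times L) (hLmin : ∀ T, n ≤ cnt times T → L ≤ T) :
    ∀ answer left right, 1 ≤ left → left ≤ L → (L ≤ right ∨ answer = L) →
      aLoop n times answer left right = L := by
  intro answer left right
  fun_induction aLoop n times answer left right with
  | case1 answer left right h mid tested htest ih =>
      intro h1 hlL hinv
      have hmb := PySem.Int.floordiv_two_mid_bounds h
      have hmid0 : (0:Int) ≤ mid := by omega
      have hcnt : n ≤ cnt times mid := by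
        have := (aInner_iff n mid times hpos hmid0 0).mp htest
        simpa using this
      have hLmid : L ≤ mid := hLmin mid hcnt
      exact ih h1 hlL (by omega)
  | case2 answer left right h mid tested htest ih =>
      intro h1 hlL hinv
      have hmb := PySem.Int.floordiv_two_mid_bounds h
      have hmid0 : (0:Int) ≤ mid := by omega
      have hcnt : ¬ n ≤ cnt times mid := by
        intro hc
        exact htest ((aInner_iff n mid times hpos hmid0 0).mpr (by simpa using hc))
      have hmidL : mid < L := by
        by_contra hnot
        exact hcnt (le_trans hL1 (cnt_mono times hpos (by omega)))
      exact ih (by omega) (by omega) (by tauto)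
  | case3 answer left right h =>
      intro h1 hlL hinv
      omega

-- ---- B-side lemmas: the simulation ----

-- with done = true, _bump changes nothing
theorem bBump_true (b : Int) : ∀ s : List (Int × Int), bBump s true b = s := by
  intro s
  induction s with
  | nil => rfl
  | cons p rest ih => obtain ⟨t, c⟩ := p; simp [bBump, ih]

theorem bBump_map_fst (b : Int) : ∀ (s : List (Int × Int)) (d : Bool),
    (bBump s d b).map Prod.fst = s.map Prod.fst := by
  intro s
  induction s with
  | nil => intro d; rfl
  | cons p rest ih =>
      intro d
      obtain ⟨t, c⟩ := p
      by_cases hd : (!d && ((c + 1) * t == b)) = true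
      · simp [bBump, hd, bBump_true]
      · simp [bBump, hd, ih d]

-- every element of the bumped state is either old or a bumped minimizer
theorem bBump_mem (b : Int) : ∀ (s : List (Int × Int)) (d : Bool),
    ∀ q ∈ bBump s d b,
      q ∈ s ∨ ∃ t c, (t, c) ∈ s ∧ q = (t, c + 1) ∧ (c + 1) * t = b := by
  intro s
  induction s with
  | nil => intro d q hq; simp [bBump] at hq
  | cons p rest ih =>
      intro d q hq
      obtain ⟨t, c⟩ := p
      by_cases hd : (!d && ((c + 1) * t == b)) = true
      · rw [bBump, if_pos hd, bBump_true] at hq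
        have hb : (c + 1) * t = b := by
          have := (Bool.and_eq_true _ _).mp hd
          exact beq_iff_eq.mp this.2
        rcases List.mem_cons.mp hq with h | h
        · exact Or.inr ⟨t, c, by simp, h, hb⟩
        · exact Or.inl (List.mem_cons_of_mem _ h)
      · rw [bBump, if_neg hd] at hq
        rcases List.mem_cons.mp hq with h | h
        · exact Or.inl (h ▸ List.mem_cons_self)
        · rcases ih d q h with h' | ⟨t', c', hm, he, hb⟩
          · exact Or.inl (List.mem_cons_of_mem _ h')
          · exact Or.inr ⟨t', c', List.mem_cons_of_mem _ hm, he, hb⟩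

-- if some key equals best, the bump adds exactly one to the count sum
theorem bBump_sum (b : Int) : ∀ s : List (Int × Int),
    (∃ p ∈ s, (p.2 + 1) * p.1 = b) →
      ((bBump s false b).map Prod.snd).sum = (s.map Prod.snd).sum + 1 := by
  intro s
  induction s with
  | nil => rintro ⟨p, hp, _⟩; simp at hp
  | cons p rest ih =>
      rintro ⟨q, hq, hqb⟩
      obtain ⟨t, c⟩ := p
      by_cases hd : ((c + 1) * t == b) = true
      · simp only [bBump, Bool.not_false, Bool.true_and, hd, if_true, bBump_true,
          List.map_cons, List.sum_cons]
        omega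
      · have hne : (c + 1) * t ≠ b := by simpa using hd
        have hqr : q ∈ rest := by
          rcases List.mem_cons.mp hq with h | h
          · exact absurd (by rw [h] at hqb; simpa using hqb) hne
          · exact h
        simp only [bBump, Bool.not_false, Bool.true_and, hd, Bool.false_eq_true,
          if_false, List.map_cons, List.sum_cons]
        rw [ih ⟨q, hqr, hqb⟩]
        omega

-- if some key equals best, the bumped state has an element with c*t = best
theorem bBump_witness (b : Int) : ∀ s : List (Int × Int),
    (∃ p ∈ s, (p.2 + 1) * p.1 = b) →
      ∃ q ∈ bBump s false b, q.2 * q.1 = b := by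
  intro s
  induction s with
  | nil => rintro ⟨p, hp, _⟩; simp at hp
  | cons p rest ih =>
      rintro ⟨q, hq, hqb⟩
      obtain ⟨t, c⟩ := p
      by_cases hd : ((c + 1) * t == b) = true
      · refine ⟨(t, c + 1), by simp [bBump, hd], ?_⟩
        simpa using hd
      · have hne : (c + 1) * t ≠ b := by simpa using hd
        have hqr : q ∈ rest := by
          rcases List.mem_cons.mp hq with h | h
          · exact absurd (by rw [h] at hqb; simpa using hqb) hne
          · exact h
        obtain ⟨q', hq', hq'b⟩ := ih ⟨q, hqr, hqb⟩
        refine ⟨q', ?_, hq'b⟩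
        simp only [bBump, Bool.not_false, Bool.true_and, hd, Bool.false_eq_true, if_false]
        exact List.mem_cons_of_mem _ hq'

-- strict sum comparison at one member
theorem sum_lt_sum_of_mem {α : Type} (f g : α → Int) :
    ∀ (l : List α), (∀ p ∈ l, f p ≤ g p) → ∀ q ∈ l, f q < g q →
      (l.map f).sum < (l.map g).sum := by
  intro l
  induction l with
  | nil => intro _ q hq; simp at hq
  | cons x xs ih =>
      intro hle q hq hlt
      simp only [List.map_cons, List.sum_cons]
      rcases List.mem_cons.mp hq with h | h
      · have h1 : (xs.map f).sum ≤ (xs.map g).sum :=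
          List.sum_le_sum fun i hi => hle i (List.mem_cons_of_mem _ hi)
        have := h ▸ hlt
        omega
      · have h1 : f x ≤ g x := hle x List.mem_cons_self
        have h2 := ih (fun i hi => hle i (List.mem_cons_of_mem _ hi)) q h hlt
        omega

-- the simulation invariant: intervals are exactly `times`, and the current answer a
-- lies between each desk's last finish c*t and next finish (c+1)*t
def SimInv (times : List Int) (s : List (Int × Int)) (a : Int) : Prop :=
  s.map Prod.fst = times ∧ ∀ p ∈ s, p.2 * p.1 ≤ a ∧ a ≤ (p.2 + 1) * p.1

-- one simulation step: pop the minimal next finish time `best` and bump its desk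
theorem bStep (times : List Int) (hne : times ≠ []) (hpos : ∀ t ∈ times, 0 < t)
    (s : List (Int × Int)) (a best : Int) (hinv : SimInv times s a)
    (hbest : best = (PySem.List.min? (s.map fun p => (p.2 + 1) * p.1)
      (fun y => y)).getD 0) :
    SimInv times (bBump s false best) best ∧ a ≤ best ∧
      ((bBump s false best).map Prod.snd).sum = (s.map Prod.snd).sum + 1 ∧
      ∃ q ∈ bBump s false best, q.2 * q.1 = best := by
  obtain ⟨hfst, hbnd⟩ := hinv
  have hsne : s ≠ [] := by
    intro h; rw [h] at hfst; exact hne hfst.symm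
  obtain ⟨v, hv⟩ : ∃ v, PySem.List.min? (s.map fun p => (p.2 + 1) * p.1)
      (fun y => y) = some v := by
    cases hm : PySem.List.min? (s.map fun p => (p.2 + 1) * p.1) (fun y => y) with
    | none =>
        have := (PySem.List.min?_eq_none_iff _ _).mp hm
        simp only [List.map_eq_nil_iff] at this
        exact absurd this hsne
    | some v => exact ⟨v, rfl⟩
  have hbv : best = v := by rw [hbest, hv]; rfl
  subst hbv
  obtain ⟨p0, hp0, hp0v⟩ := List.mem_map.mp (PySem.List.min?_mem hv)
  have hvmin : ∀ p ∈ s, best ≤ (p.2 + 1) * p.1 := by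
    intro p hp
    exact PySem.List.min?_isMin hv _ (List.mem_map_of_mem hp)
  have hkey : ∃ p ∈ s, (p.2 + 1) * p.1 = best := ⟨p0, hp0, hp0v⟩
  have havle : a ≤ best := by
    have := (hbnd p0 hp0).2
    omega
  refine ⟨⟨?_, ?_⟩, havle, bBump_sum best s hkey, bBump_witness best s hkey⟩
  · rw [bBump_map_fst, hfst]
  · intro q hq
    have hmemt : ∀ r : Int × Int, r ∈ s → 0 < r.1 := by
      intro r hr
      exact hpos r.1 (hfst ▸ List.mem_map_of_mem hr)
    rcases bBump_mem best s false q hq with h | ⟨t, c, hm, he, hb⟩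
    · exact ⟨le_trans (hbnd q h).1 havle, hvmin q h⟩
    · subst he
      have ht : 0 < t := hmemt (t, c) hm
      simp only at hb ⊢
      constructor
      · omega
      · nlinarith [hb, ht]

-- running the simulation k+1 steps preserves the invariant, adds k+1 to the
-- count sum, and ends on an exact finish time c*t of some desk
theorem bLoop_run (times : List Int) (hne : times ≠ []) (hpos : ∀ t ∈ times, 0 < t) :
    ∀ (k : Nat) (s : List (Int × Int)) (a : Int), SimInv times s a →
      ∃ s', SimInv times s' (bLoop times (k + 1) s a) ∧
        ((s'.map Prod.snd).sum = (s.map Prod.snd).sum + ((k : Int) + 1)) ∧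
        ∃ q ∈ s', q.2 * q.1 = bLoop times (k + 1) s a := by
  intro k
  induction k with
  | zero =>
      intro s a hinv
      obtain ⟨hinv', _, hsum, hwit⟩ := bStep times hne hpos s a _ hinv rfl
      have hred : bLoop times (0 + 1) s a =
          (PySem.List.min? (s.map fun p => (p.2 + 1) * p.1) (fun y => y)).getD 0 := rfl
      refine ⟨bBump s false ((PySem.List.min? (s.map fun p => (p.2 + 1) * p.1)
        (fun y => y)).getD 0), ?_, ?_, ?_⟩
      · rw [hred]; exact hinv'
      · rw [hsum]; push_cast; ring
      · rw [hred]; exact hwit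
  | succ k ih =>
      intro s a hinv
      obtain ⟨hinv', _, hsum, _⟩ := bStep times hne hpos s a _ hinv rfl
      obtain ⟨s', hI, hS, hW⟩ := ih _ _ hinv'
      have hred : bLoop times (k + 1 + 1) s a =
          bLoop times (k + 1)
            (bBump s false ((PySem.List.min? (s.map fun p => (p.2 + 1) * p.1)
              (fun y => y)).getD 0))
            ((PySem.List.min? (s.map fun p => (p.2 + 1) * p.1) (fun y => y)).getD 0) := rfl
      refine ⟨s', ?_, ?_, ?_⟩
      · rw [hred]; exact hI
      · rw [hS, hsum]; push_cast; ring
      · rw [hred]; exact hW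

-- ===== VERDICT (by name: the statement is the Claim_ definition above) =====
theorem solution_spec : Claim_equal_solution := by
  unfold Claim_equal_solution
  intro n times _hdom hpre
  obtain ⟨hne, hcase⟩ := hpre
  unfold Spec_solution solution solution_alt
  by_cases hn : n ≤ 0
  · -- trivial inputs: A's loop never runs (right = max*n ≤ 0), B pops nobody
    have hr : ((PySem.List.max? times (fun y => y)).getD 0) * n ≤ 0 := by
      rcases hcase with hpos | ⟨_, h⟩
      · obtain ⟨x, hx⟩ : ∃ x, PySem.List.max? times (fun y => y) = some x := by
          cases hmx : PySem.List.max? times (fun y => y) with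
          | none => exact absurd ((PySem.List.max?_eq_none_iff _ _).mp hmx) hne
          | some x => exact ⟨x, rfl⟩
        rw [hx, Option.getD_some]
        have := hpos x (PySem.List.max?_mem hx)
        nlinarith
      · exact h
    rw [aLoop, dif_neg (by omega), Int.toNat_of_nonpos hn]
    rfl
  · have hn1 : 1 ≤ n := by omega
    have hpos : ∀ t ∈ times, 0 < t := by
      rcases hcase with h | ⟨h0, _⟩
      · exact h
      · omega
    obtain ⟨x, hx⟩ : ∃ x, PySem.List.max? times (fun y => y) = some x := by
      cases hmx : PySem.List.max? times (fun y => y) with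
      | none => exact absurd ((PySem.List.max?_eq_none_iff _ _).mp hmx) hne
      | some x => exact ⟨x, rfl⟩
    have hxmem : x ∈ times := PySem.List.max?_mem hx
    have hx1 : 1 ≤ x := hpos x hxmem
    -- run the simulation for n.toNat = k+1 steps
    obtain ⟨k, hk⟩ : ∃ k : Nat, n.toNat = k + 1 := ⟨n.toNat - 1, by omega⟩
    have hinv0 : SimInv times (times.map fun t => (t, 0)) 0 := by
      refine ⟨by simp [Function.comp_def], ?_⟩
      intro p hp
      obtain ⟨t, ht, rfl⟩ := List.mem_map.mp hp
      have := hpos t ht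
      constructor
      · simp
      · simp; omega
    obtain ⟨s', ⟨hfst, hbnd⟩, hsum, q0, hq0, hq0r⟩ :=
      bLoop_run times hne hpos k (times.map fun t => (t, 0)) 0 hinv0
    have hmemt : ∀ p ∈ s', (0:Int) < p.1 := by
      intro p hp
      exact hpos p.1 (hfst ▸ List.mem_map_of_mem hp)
    have hsum0 : ((times.map fun t => ((t:Int), (0:Int))).map Prod.snd).sum = 0 := by
      simp [List.map_map, Function.comp_def]
    have hsn : (s'.map Prod.snd).sum = n := by
      rw [hsum, hsum0]
      have : ((n.toNat : Int)) = n := Int.toNat_of_nonneg (by omega)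
      omega
    -- r is the simulation's result
    have hcnt_eq : ∀ T, cnt times T =
        (s'.map fun p => PySem.Int.floordiv T p.1).sum := by
      intro T
      rw [cnt, ← hfst, List.map_map]
      rfl
    -- the result serves at least n people …
    have hcnt_r : n ≤ cnt times (bLoop times (k + 1) (times.map fun t => (t, 0)) 0) := by
      rw [hcnt_eq, ← hsn]
      refine List.sum_le_sum ?_
      intro p hp
      have ht := hmemt p hp
      exact (PySem.Int.le_floordiv_iff_mul_le ht).mpr (hbnd p hp).1
    -- … and one tick earlier strictly fewer than n
    have hcnt_r1 :
        cnt times (bLoop times (k + 1) (times.map fun t => (t, 0)) 0 - 1) < n := by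
      rw [hcnt_eq, ← hsn]
      refine sum_lt_sum_of_mem _ _ s' ?_ q0 hq0 ?_
      · intro p hp
        have ht := hmemt p hp
        have hub := (hbnd p hp).2
        have hlt : PySem.Int.floordiv
            (bLoop times (k + 1) (times.map fun t => (t, 0)) 0 - 1) p.1 < p.2 + 1 := by
          rw [PySem.Int.floordiv_lt_iff_lt_mul ht]
          linarith
        exact Int.lt_add_one_iff.mp hlt
      · have ht := hmemt q0 hq0
        rw [PySem.Int.floordiv_lt_iff_lt_mul ht, hq0r]
        omega
    have hr1 : 1 ≤ bLoop times (k + 1) (times.map fun t => (t, 0)) 0 := by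
      by_contra hlt
      have := cnt_nonpos times hpos
        (show bLoop times (k + 1) (times.map fun t => (t, 0)) 0 ≤ 0 by omega)
      omega
    have hLmin : ∀ T, n ≤ cnt times T →
        bLoop times (k + 1) (times.map fun t => (t, 0)) 0 ≤ T := by
      intro T hT
      by_contra hlt
      have := cnt_mono times hpos
        (show T ≤ bLoop times (k + 1) (times.map fun t => (t, 0)) 0 - 1 by omega)
      omega
    -- the count reaches n at the binary search's upper bound max*n
    have hcnt_hi : n ≤ cnt times (x * n) := by
      have hmem : PySem.Int.floordiv (x * n) x ∈
          times.map (fun y => PySem.Int.floordiv (x * n) y) :=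
        List.mem_map_of_mem hxmem
      have hval : PySem.Int.floordiv (x * n) x = n := by
        rw [PySem.Int.floordiv_eq_ediv_of_pos (by omega)]
        exact Int.mul_ediv_cancel_left n (by omega)
      have := List.single_le_sum
        (cnt_nonneg_terms times hpos (show (0:Int) ≤ x * n by nlinarith)) _ hmem
      rw [hval] at this
      exact this
    have hrhi : bLoop times (k + 1) (times.map fun t => (t, 0)) 0 ≤ x * n :=
      hLmin _ hcnt_hi
    have hA := aLoop_eq n times hpos _ hcnt_r hLmin 0 1 (x * n) le_rfl hr1 (Or.inl hrhi)
    rw [hx, Option.getD_some, hA, hk]
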